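-- pv_equiv track=rewrite | github.com/Talkasi/int_ege_tasks | unsorted_hell/tasks_22-27/25 2844.py | f
-- ===== SOURCE A (Python) =====
-- def f(n):
--     d = set()
--     for i in range(2, int(n**0.5) + 1):
--         if n % i == 0:
--             d.add(i)
--             d.add(n//i)
--         if len(d) > 3:
--             return 0
--     sorted(d)
--     if len(d) == 3:
--         return max(d)
--     else:
--         return 0
-- ===== SOURCE B (Python) =====
-- def f(n):
--     # smallest-divisor search; n has exactly three proper divisors iff it is the fourth power of a prime
--     for i in range(2, int(n**0.5) + 1):
--         if n % i == 0:
--             return n // i if i ** 4 == n else 0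
--     return 0
-- ===== Notes on version B (the rewrite author's own statement) =====
-- stated objective: simpler
-- what changed: Instead of accumulating the set of all divisor pairs with an early size check and taking its max, B stops at the first divisor p found by trial division and returns n//p exactly when n is the fourth power of p (the only way n can have exactly three proper divisors), building no set at all.
import Mathlib
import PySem

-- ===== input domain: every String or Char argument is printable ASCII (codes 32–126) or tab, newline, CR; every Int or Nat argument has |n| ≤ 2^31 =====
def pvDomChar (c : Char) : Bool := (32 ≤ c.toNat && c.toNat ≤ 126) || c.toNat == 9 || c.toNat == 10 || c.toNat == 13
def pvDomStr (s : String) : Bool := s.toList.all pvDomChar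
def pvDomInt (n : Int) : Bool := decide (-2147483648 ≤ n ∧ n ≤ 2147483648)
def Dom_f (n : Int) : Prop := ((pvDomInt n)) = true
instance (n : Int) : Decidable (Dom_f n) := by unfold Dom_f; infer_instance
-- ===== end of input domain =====

-- B replaces A's divisor-set accumulation by an early exit at the smallest divisor p,
-- answering n//p exactly when n is the fourth power of p (objective: simpler; both programs raise TypeError on negative n, excluded by Pre_).


-- ===== PORT A =====
-- int(n**0.5): exact on the nonnegative Dom_ ∧ Pre_ range; Python raises TypeError on negative n
def pyIsqrt (n : Int) : Int := ((n.toNat.sqrt : Nat) : Int)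

-- the for-loop of A: d is the Python set; early `return 0` when len(d) > 3
def fLoop (n : Int) : List Int → PySem.Set Int → Int
  | [], d => if d.length = 3 then (PySem.List.max? d (fun x => x)).getD 0 else 0
    -- max(d) of a nonempty set (guarded by len(d)==3, order-independent); `sorted(d)` discards its result: omitted
  | i :: rest, d =>
    let d' := if PySem.Int.mod n i = 0
              then PySem.Set.add (PySem.Set.add d i) (PySem.Int.floordiv n i)
              else d
    if 3 < d'.length then 0 else fLoop n rest d'

def f (n : Int) : Int :=
  fLoop n (PySem.List.pyRange 2 (pyIsqrt n + 1) 1) PySem.Set.empty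

-- ===== PORT B =====
def altLoop (n : Int) : List Int → Int
  | [] => 0
  | i :: rest =>
    if PySem.Int.mod n i = 0 then (if i ^ 4 = n then PySem.Int.floordiv n i else 0)
    else altLoop n rest

def f_alt (n : Int) : Int :=
  altLoop n (PySem.List.pyRange 2 (pyIsqrt n + 1) 1)

-- ===== PRECONDITION & SPEC =====
-- Pre_ excludes negative n, where both A and B raise TypeError (int() of the complex square root).
def Pre_f (n : Int) : Prop := 0 ≤ n
instance (n : Int) : Decidable (Pre_f n) := by unfold Pre_f; infer_instance
def pvWitness_f : Int := 16

def Spec_f (n : Int) (out : Int) : Prop := out = f_alt n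
instance (n : Int) (out : Int) : Decidable (Spec_f n out) := by unfold Spec_f; infer_instance

-- ===== CLAIM (what is proved, stated in full; the proofs are below) =====
def Claim_equal_f : Prop := ∀ (n : Int), Dom_f n → Pre_f n → Spec_f n (f n)

-- ===== LEMMAS AND PROOFS =====

lemma fLoop_nil (n : Int) (d : PySem.Set Int) :
    fLoop n [] d = if d.length = 3 then (PySem.List.max? d (fun x => x)).getD 0 else 0 := rfl

lemma fLoop_cons (n i : Int) (rest : List Int) (d : PySem.Set Int) :
    fLoop n (i :: rest) d =
      (if 3 < (if PySem.Int.mod n i = 0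
               then PySem.Set.add (PySem.Set.add d i) (PySem.Int.floordiv n i)
               else d).length then 0
       else fLoop n rest (if PySem.Int.mod n i = 0
               then PySem.Set.add (PySem.Set.add d i) (PySem.Int.floordiv n i)
               else d)) := rfl

lemma altLoop_nil (n : Int) : altLoop n [] = 0 := rfl

lemma altLoop_cons (n i : Int) (rest : List Int) :
    altLoop n (i :: rest) =
      (if PySem.Int.mod n i = 0 then (if i ^ 4 = n then PySem.Int.floordiv n i else 0)
       else altLoop n rest) := rfl

-- skipping a stretch of non-divisors leaves A's loop state unchanged
lemma fLoop_skip (n : Int) (k : Nat) : ∀ (a : Int) (rest : List Int) (d : PySem.Set Int),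
    d.length ≤ 3 →
    (∀ i : Int, a ≤ i → i < a + k → ¬ PySem.Int.mod n i = 0) →
    fLoop n (PySem.List.pyRange a (a + k) 1 ++ rest) d = fLoop n rest d := by
  induction k with
  | zero => intro a rest d _ _; simp
  | succ k ih =>
    intro a rest d hd hnd
    rw [PySem.List.pyRange_one_cons (by omega)]
    have h0 : ¬ PySem.Int.mod n a = 0 := hnd a le_rfl (by omega)
    rw [List.cons_append, fLoop_cons, if_neg h0, if_neg (by omega)]
    have he : a + ((k : Nat) + 1 : Int) = (a + 1) + k := by ring
    rw [show ((k+1:Nat):Int) = ((k:Nat):Int)+1 by push_cast; ring, he]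
    exact ih (a + 1) rest d hd (fun i h1 h2 => hnd i (by omega) (by push_cast at h2 ⊢; omega))

lemma fLoop_skip' (n a b : Int) (rest : List Int) (d : PySem.Set Int)
    (hd : d.length ≤ 3)
    (hnd : ∀ i : Int, a ≤ i → i < b → ¬ PySem.Int.mod n i = 0) :
    fLoop n (PySem.List.pyRange a b 1 ++ rest) d = fLoop n rest d := by
  rcases (by omega : b ≤ a ∨ a < b) with h | h
  · rw [PySem.List.pyRange_one_eq_nil h]; simp
  · rw [show b = a + ((b - a).toNat : Int) by omega]
    exact fLoop_skip n (b-a).toNat a rest d hd (fun i h1 h2 => hnd i h1 (by omega))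

lemma altLoop_skip (n : Int) (k : Nat) : ∀ (a : Int) (rest : List Int),
    (∀ i : Int, a ≤ i → i < a + k → ¬ PySem.Int.mod n i = 0) →
    altLoop n (PySem.List.pyRange a (a + k) 1 ++ rest) = altLoop n rest := by
  induction k with
  | zero => intro a rest _; simp
  | succ k ih =>
    intro a rest hnd
    rw [PySem.List.pyRange_one_cons (by omega)]
    have h0 : ¬ PySem.Int.mod n a = 0 := hnd a le_rfl (by omega)
    rw [List.cons_append, altLoop_cons, if_neg h0]
    have he : a + ((k : Nat) + 1 : Int) = (a + 1) + k := by ring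
    rw [show ((k+1:Nat):Int) = ((k:Nat):Int)+1 by push_cast; ring, he]
    exact ih (a + 1) rest (fun i h1 h2 => hnd i (by omega) (by push_cast at h2 ⊢; omega))

lemma altLoop_skip' (n a b : Int) (rest : List Int)
    (hnd : ∀ i : Int, a ≤ i → i < b → ¬ PySem.Int.mod n i = 0) :
    altLoop n (PySem.List.pyRange a b 1 ++ rest) = altLoop n rest := by
  rcases (by omega : b ≤ a ∨ a < b) with h | h
  · rw [PySem.List.pyRange_one_eq_nil h]; simp
  · rw [show b = a + ((b - a).toNat : Int) by omega]
    exact altLoop_skip n (b-a).toNat a rest (fun i h1 h2 => hnd i h1 (by omega))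

lemma set_add_of_notmem (d : PySem.Set Int) (x : Int) (h : ¬ x ∈ d) :
    PySem.Set.add d x = d ++ [x] := by
  simp [PySem.Set.add, PySem.Set.contains, h]

lemma set_add_of_mem (d : PySem.Set Int) (x : Int) (h : x ∈ d) :
    PySem.Set.add d x = d := by
  simp [PySem.Set.add, PySem.Set.contains, h]

lemma nat_sqrt_mul_le (m : Nat) : m.sqrt * m.sqrt ≤ m := by
  simpa [pow_two] using Nat.sqrt_le' m

lemma lt_div_of_sq_lt (m q : Nat) (hq : q ∣ m) (h : q*q < m) : q < m / q := by
  have hm := Nat.mul_div_cancel' hq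
  rcases Nat.lt_or_ge q (m/q) with h'|h'
  · exact h'
  · exfalso
    have : m ≤ q*q := by
      calc m = q*(m/q) := hm.symm
        _ ≤ q*q := Nat.mul_le_mul le_rfl h'
    omega

lemma div_lt_div_of_lt (m p q : Nat) (hp : p ∣ m) (hq : q ∣ m) (hpq : p < q) (hm : 0 < m)
    (hp0 : 0 < p) : m/q < m/p := by
  have hmp := Nat.mul_div_cancel' hp
  have hmq := Nat.mul_div_cancel' hq
  have h1 : 0 < m/p := Nat.div_pos (Nat.le_of_dvd hm hp) hp0
  rcases Nat.lt_or_ge (m/q) (m/p) with h|h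
  · exact h
  · exfalso
    have : p * (m/p) < q * (m/q) := by
      calc p * (m/p) < q * (m/p) := (Nat.mul_lt_mul_right h1).mpr hpq
        _ ≤ q * (m/q) := Nat.mul_le_mul le_rfl h
    omega

lemma sqrt_lt_div (m p : Nat) (hpd : p ∣ m) (hps : p ≤ m.sqrt) (hne : m ≠ p*p) :
    m.sqrt < m / p := by
  have hss : m.sqrt * m.sqrt ≤ m := nat_sqrt_mul_le m
  have hm := Nat.mul_div_cancel' hpd
  rcases Nat.lt_or_ge m.sqrt (m/p) with h|h
  · exact h
  · exfalso
    have h1 : m ≤ p * m.sqrt := by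
      calc m = p*(m/p) := hm.symm
        _ ≤ p * m.sqrt := Nat.mul_le_mul le_rfl h
    have h2 : p * m.sqrt ≤ m.sqrt * m.sqrt := Nat.mul_le_mul hps le_rfl
    have h3 : p * m.sqrt = m.sqrt * m.sqrt := by omega
    have hs0 : 0 < m.sqrt := by
      by_contra h0
      have hsz : m.sqrt = 0 := by omega
      have hp0 : p = 0 := by omega
      rw [hp0] at hpd
      have hm0 : m = 0 := Nat.eq_zero_of_zero_dvd hpd
      exact hne (by simp [hm0, hp0])
    have hpe : p = m.sqrt := Nat.eq_of_mul_eq_mul_right hs0 h3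
    apply hne
    rw [hpe]
    omega

set_option maxHeartbeats 1000000 in
theorem main_equiv (n : Int) (hn : 0 ≤ n) : f n = f_alt n := by
  obtain ⟨m, rfl⟩ : ∃ m : Nat, n = (m : Int) := ⟨n.toNat, (Int.toNat_of_nonneg hn).symm⟩
  have hsq : pyIsqrt (m : Int) = (m.sqrt : Int) := by simp [pyIsqrt]
  have hmodiff : ∀ k : Nat, PySem.Int.mod (m:Int) (k:Int) = 0 ↔ k ∣ m := by
    intro k
    rw [PySem.Int.mod_eq_zero_iff_dvd]
    exact Int.natCast_dvd_natCast
  have hss : m.sqrt * m.sqrt ≤ m := nat_sqrt_mul_le m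
  unfold f f_alt
  rw [hsq]
  by_cases H : ∃ k : Nat, 2 ≤ k ∧ k ≤ m.sqrt ∧ k ∣ m
  · -- p = the smallest divisor of m in [2, sqrt m]
    obtain ⟨p, ⟨hp2, hps, hpd⟩, hpmin⟩ :
        ∃ p, (2 ≤ p ∧ p ≤ m.sqrt ∧ p ∣ m) ∧ ∀ k, 2 ≤ k → k ≤ m.sqrt → k ∣ m → p ≤ k :=
      ⟨Nat.find H, Nat.find_spec H, fun k h1 h2 h3 => Nat.find_min' H ⟨h1, h2, h3⟩⟩
    have hppm : p * p ≤ m := le_trans (Nat.mul_le_mul hps hps) hss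
    have hm4 : 4 ≤ m := le_trans (Nat.mul_le_mul hp2 hp2) hppm
    have hpfac : p = m.minFac := by
      have h1 : m.minFac ≤ p := Nat.minFac_le_of_dvd hp2 hpd
      have h2 : 2 ≤ m.minFac := (Nat.minFac_prime (by omega : m ≠ 1)).two_le
      have h4 : p ≤ m.minFac := hpmin _ h2 (le_trans h1 hps) (Nat.minFac_dvd m)
      omega
    have hprime : p.Prime := hpfac ▸ Nat.minFac_prime (by omega : m ≠ 1)
    have hmodp : PySem.Int.mod (m:Int) (p:Int) = 0 := (hmodiff p).mpr hpd
    have hfdp : PySem.Int.floordiv (m:Int) (p:Int) = ((m / p : Nat) : Int) :=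
      PySem.Int.floordiv_natCast m p
    -- split the range at p
    rw [PySem.List.pyRange_one_append 2 (p:Int) ((m.sqrt:Int)+1) (by omega) (by omega),
        PySem.List.pyRange_one_cons (by omega : (p:Int) < (m.sqrt:Int)+1)]
    have hskip1 : ∀ i : Int, 2 ≤ i → i < (p:Int) → ¬ PySem.Int.mod (m:Int) i = 0 := by
      intro i h1 h2 hmod0
      lift i to Nat using (by omega) with k
      rw [hmodiff k] at hmod0
      have := hpmin k (by omega) (by omega) hmod0
      omega
    rw [fLoop_skip' (m:Int) 2 (p:Int) _ PySem.Set.empty (by simp [PySem.Set.empty]) hskip1,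
        altLoop_skip' (m:Int) 2 (p:Int) _ hskip1]
    rw [fLoop_cons, altLoop_cons, if_pos hmodp, if_pos hmodp]
    have e1 : PySem.Set.add PySem.Set.empty ((p:Int)) = [(p:Int)] := rfl
    by_cases hsq2 : m = p * p
    · -- m is the square of its least prime factor: the range ends right at p, both return 0
      have hsp : m.sqrt = p := by
        rw [hsq2, ← pow_two]; exact Nat.sqrt_eq' p
      have hdiv : m / p = p := by rw [hsq2]; exact Nat.mul_div_cancel_left p (by omega)
      have hL2 : PySem.List.pyRange ((p:Int)+1) ((m.sqrt:Int)+1) 1 = [] :=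
        PySem.List.pyRange_one_eq_nil (by omega)
      rw [hL2, hfdp, hdiv, e1, set_add_of_mem _ _ (by simp)]
      rw [if_neg (by simp), fLoop_nil, if_neg (by simp)]
      rw [if_neg (show ¬ ((p:Int))^4 = (m:Int) from by
        intro h
        have h' : p^4 = m := by exact_mod_cast h
        have hb : p^2 < p^4 := Nat.pow_lt_pow_right (by omega : 1 < p) (by omega)
        have hb2 : p*p = p^2 := (pow_two p).symm
        omega)]
    · have hplt : p * p < m := lt_of_le_of_ne hppm (fun h => hsq2 h.symm)
      have hdne : m / p ≠ p := by
        intro h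
        apply hsq2
        rw [← Nat.mul_div_cancel' hpd, h]
      have e2 : PySem.Set.add [(p:Int)] ((m/p : Nat) : Int) = [(p:Int), ((m/p : Nat) : Int)] := by
        apply set_add_of_notmem
        simp only [List.mem_singleton]
        exact_mod_cast hdne
      rw [hfdp, e1, e2, if_neg (by simp)]
      by_cases h4 : m = p ^ 4
      · -- m = p^4: A ends with d = {p, p^3, p^2} and returns max = p^3 = n // p
        have hs4 : m.sqrt = p^2 := by rw [h4, show p^4 = (p^2)^2 from by ring]; exact Nat.sqrt_eq' _
        have hmp3 : m / p = p^3 := by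
          rw [h4, show p^4 = p^3 * p from by ring]; exact Nat.mul_div_cancel _ (by omega)
        have hpow1 : p < p^2 := by
          simpa using Nat.pow_lt_pow_right (by omega : 1 < p) (by omega : 1 < 2)
        have hpow2 : p^2 < p^3 := Nat.pow_lt_pow_right (by omega : 1 < p) (by omega)
        have hpow4 : p^2 < p^4 := Nat.pow_lt_pow_right (by omega : 1 < p) (by omega)
        have hpow3 : p + 1 ≤ p^2 := by omega
        rw [hs4, PySem.List.pyRange_one_append ((p:Int)+1) ((p^2:Nat):Int) (((p^2:Nat):Int)+1)
              (by exact_mod_cast hpow3) (by omega)]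
        rw [PySem.List.pyRange_one_singleton]
        have hskip2 : ∀ i : Int, (p:Int)+1 ≤ i → i < ((p^2:Nat):Int) → ¬ PySem.Int.mod (m:Int) i = 0 := by
          intro i h1 h2 hmod0
          lift i to Nat using (by omega) with k
          rw [hmodiff k] at hmod0
          rw [h4] at hmod0
          obtain ⟨j, hj4, hkj⟩ := (Nat.dvd_prime_pow hprime).mp hmod0
          have hk1 : p + 1 ≤ k := by exact_mod_cast h1
          have hk2 : k < p^2 := by exact_mod_cast h2
          interval_cases j <;> (try simp only [pow_zero, pow_one] at hkj) <;> omega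
        rw [fLoop_skip' (m:Int) ((p:Int)+1) ((p^2:Nat):Int) _ _ (by simp) hskip2]
        have hmodp2 : PySem.Int.mod (m:Int) ((p^2:Nat):Int) = 0 := by
          rw [hmodiff, h4]; exact pow_dvd_pow p (by omega)
        have hfdp2 : PySem.Int.floordiv (m:Int) ((p^2:Nat):Int) = ((m / p^2 : Nat) : Int) :=
          PySem.Int.floordiv_natCast m (p^2)
        have hdp2 : m / p^2 = p^2 := by
          rw [h4, show p^4 = p^2 * p^2 from by ring]
          exact Nat.mul_div_cancel_left _ (Nat.pow_pos (by omega : 0 < p) )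
        rw [fLoop_cons, if_pos hmodp2, hfdp2, hdp2, hmp3]
        have hne1 : ((p^2:Nat):Int) ≠ (p:Int) := (Nat.cast_lt.mpr hpow1).ne'
        have hne2 : ((p^2:Nat):Int) ≠ ((p^3:Nat):Int) := (Nat.cast_lt.mpr hpow2).ne
        have e3 : PySem.Set.add [(p:Int), ((p^3:Nat):Int)] ((p^2:Nat):Int)
            = [(p:Int), ((p^3:Nat):Int), ((p^2:Nat):Int)] := by
          apply set_add_of_notmem
          intro hmem
          simp only [List.mem_cons, List.not_mem_nil, or_false] at hmem
          rcases hmem with h | h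
          · exact hne1 h
          · exact hne2 h
        rw [e3, set_add_of_mem _ _ (by simp)]
        rw [if_neg (by simp), fLoop_nil, if_pos (by simp)]
        rw [if_pos (show ((p:Int))^4 = (m:Int) from by exact_mod_cast h4.symm)]
        rw [PySem.List.max?_id_cons]
        have hle1 : (p:Int) ≤ ((p^3:Nat):Int) := by
          have h13 : p ≤ p^3 := Nat.le_self_pow (by omega) p
          exact_mod_cast h13
        have hle2 : ((p^2:Nat):Int) ≤ ((p^3:Nat):Int) := le_of_lt (Nat.cast_lt.mpr hpow2)
        simp only [List.foldl, Option.getD_some]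
        rw [max_eq_right hle1, max_eq_left hle2]
      · -- m ≠ p^4: A's set can never end with exactly 3 elements; both return 0
        rw [if_neg (show ¬ ((p:Int))^4 = (m:Int) from by
          intro h
          exact h4 (by exact_mod_cast h.symm))]
        by_cases H2 : ∃ k : Nat, p + 1 ≤ k ∧ k ≤ m.sqrt ∧ k ∣ m
        · obtain ⟨q, ⟨hq1, hq2, hq3⟩, hqmin⟩ :
              ∃ q, (p + 1 ≤ q ∧ q ≤ m.sqrt ∧ q ∣ m) ∧ ∀ k, p + 1 ≤ k → k ≤ m.sqrt → k ∣ m → q ≤ k :=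
            ⟨Nat.find H2, Nat.find_spec H2, fun k a b c => Nat.find_min' H2 ⟨a, b, c⟩⟩
          have hqq : q * q ≠ m := by
            intro hqqm
            have hpq : p ∣ q := by
              have hd : p ∣ q * q := by rw [hqqm]; exact hpd
              rcases (Nat.Prime.dvd_mul hprime).mp hd with h | h <;> exact h
            obtain ⟨c, hc⟩ := hpq
            have hc2 : 2 ≤ c := by
              rcases c with _ | _ | c'
              · exfalso; simp at hc; omega
              · exfalso; simp at hc; omega
              · omega
            have hcd : c ∣ m := dvd_trans ⟨p, by rw [hc]; ring⟩ hq3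
            have hclt : c < q := by
              have h2c : 2*c ≤ p*c := Nat.mul_le_mul hp2 le_rfl
              rw [hc]; omega
            have hcnep : c ≠ p := by
              intro hcep
              apply h4
              rw [← hqqm, hc, hcep]; ring
            have hcp : p ≤ c := hpmin c hc2 (le_trans (le_of_lt hclt) hq2) hcd
            have := hqmin c (by omega) (le_trans (le_of_lt hclt) hq2) hcd
            omega
          have hqlt : q * q < m := lt_of_le_of_ne (le_trans (Nat.mul_le_mul hq2 hq2) hss) hqq
          have hdivq : q < m / q := lt_div_of_sq_lt m q hq3 hqlt
          have hdivpq : m / q < m / p := div_lt_div_of_lt m p q hpd hq3 (by omega) (by omega) (by omega)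
          have hsdp : m.sqrt < m / p := sqrt_lt_div m p hpd hps hsq2
          rw [PySem.List.pyRange_one_append ((p:Int)+1) (q:Int) ((m.sqrt:Int)+1)
                (by omega) (by omega),
              PySem.List.pyRange_one_cons (by omega : (q:Int) < (m.sqrt:Int)+1)]
          have hskip3 : ∀ i : Int, (p:Int)+1 ≤ i → i < (q:Int) → ¬ PySem.Int.mod (m:Int) i = 0 := by
            intro i h1 h2 hmod0
            lift i to Nat using (by omega) with k
            rw [hmodiff k] at hmod0
            have := hqmin k (by omega) (by omega) hmod0
            omega
          rw [fLoop_skip' (m:Int) ((p:Int)+1) (q:Int) _ _ (by simp) hskip3]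
          have hmodq : PySem.Int.mod (m:Int) (q:Int) = 0 := (hmodiff q).mpr hq3
          have hfdq : PySem.Int.floordiv (m:Int) (q:Int) = ((m / q : Nat) : Int) :=
            PySem.Int.floordiv_natCast m q
          rw [fLoop_cons, if_pos hmodq, hfdq]
          have hqnep : (q:Int) ≠ (p:Int) := (Nat.cast_lt.mpr (by omega : p < q)).ne'
          have hqnemp : (q:Int) ≠ ((m/p:Nat):Int) := (Nat.cast_lt.mpr (by omega : q < m/p)).ne
          have e4 : PySem.Set.add [(p:Int), ((m/p:Nat):Int)] (q:Int)
              = [(p:Int), ((m/p:Nat):Int), (q:Int)] := by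
            apply set_add_of_notmem
            intro hmem
            simp only [List.mem_cons, List.not_mem_nil, or_false] at hmem
            rcases hmem with h | h
            · exact hqnep h
            · exact hqnemp h
          have hmqnep : ((m/q:Nat):Int) ≠ (p:Int) := (Nat.cast_lt.mpr (by omega : p < m/q)).ne'
          have hmqnemp : ((m/q:Nat):Int) ≠ ((m/p:Nat):Int) := (Nat.cast_lt.mpr hdivpq).ne
          have hmqneq : ((m/q:Nat):Int) ≠ (q:Int) := (Nat.cast_lt.mpr hdivq).ne'
          have e5 : PySem.Set.add [(p:Int), ((m/p:Nat):Int), (q:Int)] ((m/q:Nat):Int)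
              = [(p:Int), ((m/p:Nat):Int), (q:Int), ((m/q:Nat):Int)] := by
            apply set_add_of_notmem
            intro hmem
            simp only [List.mem_cons, List.not_mem_nil, or_false] at hmem
            rcases hmem with h | h | h
            · exact hmqnep h
            · exact hmqnemp h
            · exact hmqneq h
          rw [e4, e5, if_pos (by simp)]
        · -- no further divisor: the set stays {p, m/p}
          have hskip4 : ∀ i : Int, (p:Int)+1 ≤ i → i < (m.sqrt:Int)+1 → ¬ PySem.Int.mod (m:Int) i = 0 := by
            intro i h1 h2 hmod0
            lift i to Nat using (by omega) with k
            rw [hmodiff k] at hmod0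
            exact H2 ⟨k, by omega, by omega, hmod0⟩
          rw [← List.append_nil (PySem.List.pyRange ((p:Int)+1) ((m.sqrt:Int)+1) 1)]
          rw [fLoop_skip' (m:Int) ((p:Int)+1) ((m.sqrt:Int)+1) [] _ (by simp) hskip4]
          rw [fLoop_nil, if_neg (by simp)]
  · -- no divisor at all in [2, sqrt m]: both return 0
    have hskip : ∀ i : Int, 2 ≤ i → i < (m.sqrt:Int)+1 → ¬ PySem.Int.mod (m:Int) i = 0 := by
      intro i h1 h2 hmod0
      lift i to Nat using (by omega) with k
      rw [hmodiff k] at hmod0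
      exact H ⟨k, by omega, by omega, hmod0⟩
    rw [← List.append_nil (PySem.List.pyRange 2 ((m.sqrt:Int)+1) 1)]
    rw [fLoop_skip' (m:Int) 2 ((m.sqrt:Int)+1) [] PySem.Set.empty (by simp [PySem.Set.empty]) hskip,
        altLoop_skip' (m:Int) 2 ((m.sqrt:Int)+1) [] hskip]
    rw [fLoop_nil, altLoop_nil, if_neg (by simp [PySem.Set.empty])]

-- ===== VERDICT (by name: the statement is the Claim_ definition above) =====
theorem f_spec : Claim_equal_f := by
  intro n _ hpre
  unfold Spec_f
  exact main_equiv n hpre
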